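-- pv_equiv track=rewrite | github.com/Edward1304/Client-server-server-application-symptom-control-covid-19 | Lb_Fun_sqlite.py | Numero_Checbox
-- ===== SOURCE A (Python) =====
-- def Numero_Checbox(l_Num):                              #FUNCION PARA TRANSFORMA LA LISTA OBTENIA DE NUMEROS, EN UN
--             Cont = 1                                    # SOLO NUMERO
--             Despl =l_Num[0]
--             while Cont < len(l_Num):
--                   Despl = Despl << 1
--                   Despl = Despl ^ l_Num [Cont]
--                   Cont = Cont + 1
--             return(Despl)
-- ===== SOURCE B (Python) =====
-- def Numero_Checbox(l_Num):
--     # Closed form: since << distributes over ^, the shift-xor recurrence equals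
--     # the XOR of every element shifted left by its distance from the end.
--     n = len(l_Num)
--     shifted = [x << (n - 1 - i) for i, x in enumerate(l_Num)]
--     acc = shifted[0]          # IndexError on the empty list, as in A
--     for t in shifted[1:]:
--         acc ^= t
--     return acc
-- ===== Notes on version B (the rewrite author's own statement) =====
-- stated objective: alternative
-- what changed: Replaces the threaded shift-xor accumulator loop with a closed form: build the list of elements each shifted left by its distance from the end, then XOR them together (correct because << distributes over ^).
import Mathlib
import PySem

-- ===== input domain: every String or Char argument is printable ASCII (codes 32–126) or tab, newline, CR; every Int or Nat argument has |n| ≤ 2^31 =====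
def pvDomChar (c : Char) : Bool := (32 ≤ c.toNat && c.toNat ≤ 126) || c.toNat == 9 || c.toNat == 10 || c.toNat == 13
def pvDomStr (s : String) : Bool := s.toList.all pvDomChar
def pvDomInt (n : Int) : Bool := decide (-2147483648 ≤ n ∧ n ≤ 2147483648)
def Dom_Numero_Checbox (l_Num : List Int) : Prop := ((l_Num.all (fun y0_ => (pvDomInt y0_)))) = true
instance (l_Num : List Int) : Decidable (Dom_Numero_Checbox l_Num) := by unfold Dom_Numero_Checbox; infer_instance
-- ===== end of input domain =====

-- B replaces A's threaded shift-xor accumulator loop with a closed form: XOR of every element shifted by its distance from the end (alternative algorithm, same cost).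


-- ===== PORT A =====
-- while loop: Cont runs 1 .. len-1, Despl := (Despl << 1) ^ l_Num[Cont]
def Numero_Checbox (l_Num : List Int) : Int :=
  (PySem.List.pyRange 1 (l_Num.length : Int) 1).foldl
    (fun Despl Cont => PySem.Int.bxor (Despl <<< (1 : Nat)) (PySem.List.pyGetD l_Num Cont 0))
    (PySem.List.pyGetD l_Num 0 0)

-- ===== PORT B =====
-- shifted = [x << (n-1-i) for i, x in enumerate(l_Num)]; acc = shifted[0]; for t in shifted[1:]: acc ^= t
def Numero_Checbox_alt (l_Num : List Int) : Int :=
  let n := l_Num.length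
  let shifted : List Int := (PySem.List.enumerate l_Num).map (fun (p : Int × Int) => p.2 <<< (n - 1 - p.1.toNat))
  match shifted with
  | [] => 0  -- unreachable under Pre_: shifted[0] raises IndexError in Python
  | t :: ts => ts.foldl (fun acc u => PySem.Int.bxor acc u) t

-- ===== PRECONDITION & SPEC =====
-- A (and B) raise IndexError on the empty list.
def Pre_Numero_Checbox (l_Num : List Int) : Prop := l_Num ≠ []
instance (l_Num : List Int) : Decidable (Pre_Numero_Checbox l_Num) := by unfold Pre_Numero_Checbox; infer_instance
def pvWitness_Numero_Checbox : List Int := [1, 0, 1]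

def Spec_Numero_Checbox (l_Num : List Int) (out : Int) : Prop := out = Numero_Checbox_alt l_Num
instance (l_Num : List Int) (out : Int) : Decidable (Spec_Numero_Checbox l_Num out) := by unfold Spec_Numero_Checbox; infer_instance

-- ===== CLAIM (what is proved, stated in full; the proofs are below) =====
def Claim_equal_Numero_Checbox : Prop := ∀ (l_Num : List Int), Dom_Numero_Checbox l_Num → Pre_Numero_Checbox l_Num → Spec_Numero_Checbox l_Num (Numero_Checbox l_Num)

-- ===== LEMMAS AND PROOFS =====

-- A's loop, written as a fold of the step over the tail, seeded with the head.
def pvAfold (x : Int) (xs : List Int) : Int :=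
  xs.foldl (fun a y => PySem.Int.bxor (a <<< (1 : Nat)) y) x

-- B's two stages as named helpers (definitionally what Numero_Checbox_alt computes).
def pvShifts (l : List Int) : List Int :=
  (PySem.List.enumerate l).map (fun (p : Int × Int) => p.2 <<< (l.length - 1 - p.1.toNat))

def pvXorFold (l : List Int) : Int :=
  match l with
  | [] => 0
  | t :: ts => ts.foldl (fun acc u => PySem.Int.bxor acc u) t

theorem alt_eq_xorFold_shifts (l : List Int) :
    Numero_Checbox_alt l = pvXorFold (pvShifts l) := by
  simp only [Numero_Checbox_alt, pvShifts, pvXorFold]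

-- Nat xor on even/odd decompositions.
theorem tb_two (x i : Nat) : (2*x).testBit (i+1) = x.testBit i := by
  rw [Nat.testBit_succ]; congr 1; omega

theorem tb_two' (x i : Nat) : (2*x+1).testBit (i+1) = x.testBit i := by
  rw [Nat.testBit_succ]; congr 1; omega

theorem nat_xor_ee (m n : Nat) : (2*m) ^^^ (2*n) = 2*(m ^^^ n) := by
  apply Nat.eq_of_testBit_eq; intro i
  cases i with
  | zero => simp
  | succ j => simp [Nat.testBit_xor, tb_two]

theorem nat_xor_eo (m n : Nat) : (2*m) ^^^ (2*n+1) = 2*(m ^^^ n)+1 := by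
  apply Nat.eq_of_testBit_eq; intro i
  cases i with
  | zero => simp
  | succ j => simp [Nat.testBit_xor, tb_two, tb_two']

theorem nat_xor_oe (m n : Nat) : (2*m+1) ^^^ (2*n) = 2*(m ^^^ n)+1 := by
  apply Nat.eq_of_testBit_eq; intro i
  cases i with
  | zero => simp
  | succ j => simp [Nat.testBit_xor, tb_two, tb_two']

theorem nat_xor_oo (m n : Nat) : (2*m+1) ^^^ (2*n+1) = 2*(m ^^^ n) := by
  apply Nat.eq_of_testBit_eq; intro i
  cases i with
  | zero =>
    simp
    omega
  | succ j => simp [Nat.testBit_xor, tb_two, tb_two']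

-- Doubling distributes over Python xor on Int.
theorem bxor_double (a b : Int) :
    PySem.Int.bxor (2*a) (2*b) = 2 * PySem.Int.bxor a b := by
  unfold PySem.Int.bxor
  by_cases ha : 0 ≤ a <;> by_cases hb : 0 ≤ b
  · have h1 : (2*a).toNat = 2*a.toNat := by omega
    have h2 : (2*b).toNat = 2*b.toNat := by omega
    simp only [if_pos ha, if_pos hb, if_pos (by omega : (0:Int) ≤ 2*a),
      if_pos (by omega : (0:Int) ≤ 2*b), h1, h2, nat_xor_ee]
    push_cast; ring
  · have h1 : (2*a).toNat = 2*a.toNat := by omega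
    have h2 : (-(2*b)-1).toNat = 2*(-b-1).toNat + 1 := by omega
    simp only [if_pos ha, if_neg (by omega : ¬ (0:Int) ≤ b),
      if_pos (by omega : (0:Int) ≤ 2*a), if_neg (by omega : ¬ (0:Int) ≤ 2*b),
      h1, h2, nat_xor_eo]
    push_cast; ring
  · have h1 : (-(2*a)-1).toNat = 2*(-a-1).toNat + 1 := by omega
    have h2 : (2*b).toNat = 2*b.toNat := by omega
    simp only [if_neg (by omega : ¬ (0:Int) ≤ a), if_pos hb,
      if_neg (by omega : ¬ (0:Int) ≤ 2*a), if_pos (by omega : (0:Int) ≤ 2*b),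
      h1, h2, nat_xor_oe]
    push_cast; ring
  · have h1 : (-(2*a)-1).toNat = 2*(-a-1).toNat + 1 := by omega
    have h2 : (-(2*b)-1).toNat = 2*(-b-1).toNat + 1 := by omega
    simp only [if_neg (by omega : ¬ (0:Int) ≤ a), if_neg (by omega : ¬ (0:Int) ≤ b),
      if_neg (by omega : ¬ (0:Int) ≤ 2*a), if_neg (by omega : ¬ (0:Int) ≤ 2*b),
      h1, h2, nat_xor_oo]
    push_cast; ring

theorem int_shl_one (a : Int) : a <<< (1 : Nat) = 2 * a := by
  rw [Int.shiftLeft_eq]; ring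

theorem bxor_shl_one (a b : Int) :
    PySem.Int.bxor a b <<< (1 : Nat) = PySem.Int.bxor (a <<< (1 : Nat)) (b <<< (1 : Nat)) := by
  simp only [int_shl_one, bxor_double]

theorem int_shl_succ (a : Int) (m : Nat) : a <<< (m + 1) = (a <<< m) <<< (1 : Nat) := by
  simp only [Int.shiftLeft_eq]
  ring

-- Shifting every term by one and xor-folding = xor-folding then shifting by one.
theorem xorFold_map_shl (t : Int) (ts : List Int) :
    (ts.map (fun u : Int => u <<< (1 : Nat))).foldl (fun acc u => PySem.Int.bxor acc u) (t <<< (1 : Nat))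
      = (ts.foldl (fun acc u => PySem.Int.bxor acc u) t) <<< (1 : Nat) := by
  induction ts generalizing t with
  | nil => rfl
  | cons u us ih => simp only [List.map_cons, List.foldl_cons, ← bxor_shl_one, ih]

-- pvShifts of a snoc: every old term gains one more shift, the new element comes last unshifted.
theorem shifts_snoc (l : List Int) (y : Int) :
    pvShifts (l ++ [y]) = (pvShifts l).map (fun u : Int => u <<< (1 : Nat)) ++ [y] := by
  unfold pvShifts
  rw [PySem.List.enumerate_append]
  simp only [List.map_append, List.map_map]
  congr 1
  · apply List.map_congr_left
    intro p hp
    rcases (PySem.List.mem_enumerate_iff _ _ _).mp hp with ⟨k, hk, rfl⟩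
    simp only [Function.comp]
    have h1 : (l ++ [y]).length - 1 - ((0:Int) + k).toNat = (l.length - 1 - ((0:Int) + k).toNat) + 1 := by
      simp only [List.length_append, List.length_cons, List.length_nil]
      omega
    rw [h1, int_shl_succ]
  · simp only [PySem.List.enumerate, List.length_append, List.length_cons, List.length_nil,
      List.map_cons, List.map_nil]
    norm_num

theorem xorFold_snoc_shl (l : List Int) (y : Int) (h : l ≠ []) :
    pvXorFold ((l.map (fun u : Int => u <<< (1 : Nat))) ++ [y])
      = PySem.Int.bxor (pvXorFold l <<< (1 : Nat)) y := by
  match l with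
  | [] => exact absurd rfl h
  | t :: ts =>
    simp only [List.map_cons, List.cons_append, pvXorFold, List.foldl_append,
      List.foldl_cons, List.foldl_nil, xorFold_map_shl]

theorem shifts_ne_nil (x : Int) (xs : List Int) : pvShifts (x :: xs) ≠ [] := by
  unfold pvShifts
  simp [PySem.List.enumerate_cons]

-- Main bridge: B's closed form satisfies A's recurrence, hence equals A's fold.
theorem alt_cons_snoc (x : Int) (xs : List Int) (y : Int) :
    Numero_Checbox_alt (x :: (xs ++ [y]))
      = PySem.Int.bxor (Numero_Checbox_alt (x :: xs) <<< (1 : Nat)) y := by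
  rw [alt_eq_xorFold_shifts, alt_eq_xorFold_shifts,
    show x :: (xs ++ [y]) = (x :: xs) ++ [y] from rfl, shifts_snoc]
  exact xorFold_snoc_shl _ _ (shifts_ne_nil x xs)

theorem alt_single (x : Int) : Numero_Checbox_alt [x] = x := by
  rw [alt_eq_xorFold_shifts]
  simp [pvShifts, PySem.List.enumerate, pvXorFold]

theorem alt_eq_afold (xs : List Int) : ∀ x, Numero_Checbox_alt (x :: xs) = pvAfold x xs := by
  induction xs using List.reverseRecOn with
  | nil => intro x; simpa [pvAfold] using alt_single x
  | append_singleton us y ih =>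
    intro x
    rw [alt_cons_snoc, ih x]
    simp only [pvAfold, List.foldl_append, List.foldl_cons, List.foldl_nil]

-- ===== VERDICT (by name: the statement is the Claim_ definition above) =====
theorem Numero_Checbox_spec : Claim_equal_Numero_Checbox := by
  intro l _ hpre
  match l with
  | [] => exact absurd rfl hpre
  | x :: xs =>
    unfold Spec_Numero_Checbox Numero_Checbox
    rw [alt_eq_afold]
    have h := PySem.List.foldl_pyRange_pyGetD' (x :: xs) 0
      (fun acc y => PySem.Int.bxor (acc <<< (1 : Nat)) y) (PySem.List.pyGetD (x :: xs) 0 0) (a := 1)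
      (by norm_num)
    simp only [h]
    simp [pvAfold, PySem.List.pyGetD, PySem.List.pyGet?, PySem.List.pyIdx?]
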